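-- pv_equiv track=rewrite | github.com/BrachystochroneSD/machine_learning | session1/sale_person/sale_person.py | get_largeX
-- ===== SOURCE A (Python) =====
-- def get_largeX(array):
--     ret_index=-1
--     for i in range(len(array)-1):
--         if array[i]<array[i+1] and i > ret_index:
--             ret_index=i
--     if ret_index==-1:
--         return None
--     else:
--         return ret_index
-- ===== SOURCE B (Python) =====
-- def get_largeX(array):
--     for i in range(len(array) - 2, -1, -1):
--         if array[i] < array[i + 1]:
--             return i
--     return None
-- ===== Notes on version B (the rewrite author's own statement) =====
-- stated objective: simpler
-- what changed: B scans backwards and returns the first (hence last-in-order) ascending index immediately, replacing A's full forward pass with a running-max accumulator and redundant guard.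
import Mathlib
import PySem

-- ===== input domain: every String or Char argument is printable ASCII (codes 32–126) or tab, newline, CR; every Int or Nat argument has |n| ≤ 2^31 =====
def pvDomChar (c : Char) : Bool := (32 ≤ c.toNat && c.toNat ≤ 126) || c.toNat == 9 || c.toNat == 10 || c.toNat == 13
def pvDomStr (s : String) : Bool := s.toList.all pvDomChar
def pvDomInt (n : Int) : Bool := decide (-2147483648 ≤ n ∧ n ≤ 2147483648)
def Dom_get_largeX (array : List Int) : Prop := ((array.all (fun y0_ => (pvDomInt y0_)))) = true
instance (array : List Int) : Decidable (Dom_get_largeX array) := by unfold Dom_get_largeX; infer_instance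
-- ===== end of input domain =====

-- B replaces A's accumulating forward pass by a backward scan that returns the first ascending index it meets (simpler, early exit).

-- ===== PORT A =====
-- forward loop: ret_index accumulator, guard `array[i]<array[i+1] and i > ret_index`
def get_largeX (array : List Int) : Option Int :=
  let ret :=
    (PySem.List.pyRange 0 ((PySem.List.len array) - 1) 1).foldl
      (fun r i =>
        if PySem.List.pyGetD array i 0 < PySem.List.pyGetD array (i + 1) 0 ∧ i > r then i else r)
      (-1)
  if ret = -1 then none else some ret

-- ===== PORT B =====
-- backward loop over range(len(array)-2, -1, -1); first hit is returned at once
def altScan (array : List Int) : List Int → Option Int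
  | [] => none
  | i :: rest =>
      if PySem.List.pyGetD array i 0 < PySem.List.pyGetD array (i + 1) 0 then some i
      else altScan array rest

def get_largeX_alt (array : List Int) : Option Int :=
  altScan array (PySem.List.pyRange ((PySem.List.len array) - 2) (-1) (-1))

-- ===== PRECONDITION & SPEC =====
def Spec_get_largeX (array : List Int) (out : Option Int) : Prop := out = get_largeX_alt array
instance (array : List Int) (out : Option Int) : Decidable (Spec_get_largeX array out) := by unfold Spec_get_largeX; infer_instance

-- ===== CLAIM (what is proved, stated in full; the proofs are below) =====
def Claim_equal_get_largeX : Prop := ∀ (array : List Int), Dom_get_largeX array → Spec_get_largeX array (get_largeX array)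

-- ===== LEMMAS AND PROOFS =====

-- the ascending test both programs use, as a Bool
def ascB (array : List Int) (i : Int) : Bool :=
  decide (PySem.List.pyGetD array i 0 < PySem.List.pyGetD array (i + 1) 0)

-- B's scan is find? of the ascending test
theorem altScan_eq_find? (array : List Int) (l : List Int) :
    altScan array l = l.find? (ascB array) := by
  induction l with
  | nil => rfl
  | cons i rest ih =>
      by_cases h : PySem.List.pyGetD array i 0 < PySem.List.pyGetD array (i + 1) 0 <;>
        simp [altScan, List.find?, ascB, h, ih]

-- on a strictly increasing index list whose elements all exceed the seed,
-- A's `i > ret_index` guard is vacuous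
theorem foldl_guard (array : List Int) (l : List Int) (r0 : Int)
    (hgt : ∀ i ∈ l, r0 < i) (hp : l.Pairwise (· < ·)) :
    l.foldl (fun r i =>
        if PySem.List.pyGetD array i 0 < PySem.List.pyGetD array (i + 1) 0 ∧ i > r then i else r) r0
    = l.foldl (fun r i =>
        if PySem.List.pyGetD array i 0 < PySem.List.pyGetD array (i + 1) 0 then i else r) r0 := by
  induction l generalizing r0 with
  | nil => rfl
  | cons i rest ih =>
      have hri : r0 < i := hgt i (by simp)
      have hrest : ∀ j ∈ rest, i < j := by
        intro j hj; exact (List.pairwise_cons.mp hp).1 j hj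
      simp only [List.foldl_cons]
      by_cases h : PySem.List.pyGetD array i 0 < PySem.List.pyGetD array (i + 1) 0
      · simp only [h, hri, gt_iff_lt, true_and, if_pos]
        exact ih i hrest (List.pairwise_cons.mp hp).2
      · simp only [h, false_and, if_false]
        exact ih r0 (fun j hj => hgt j (List.mem_cons_of_mem _ hj)) (List.pairwise_cons.mp hp).2
      
-- "last updater wins": the keep-latest fold is find? on the reversed list
theorem foldl_last (array : List Int) (l : List Int) (r0 : Int) :
    l.foldl (fun r i =>
        if PySem.List.pyGetD array i 0 < PySem.List.pyGetD array (i + 1) 0 then i else r) r0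
    = (l.reverse.find? (ascB array)).getD r0 := by
  induction l generalizing r0 with
  | nil => rfl
  | cons i rest ih =>
      simp only [List.foldl_cons, List.reverse_cons, List.find?_append, ih]
      cases hf : rest.reverse.find? (ascB array) with
      | some y => simp
      | none =>
          by_cases h : PySem.List.pyGetD array i 0 < PySem.List.pyGetD array (i + 1) 0 <;>
            simp [List.find?, ascB, h]

-- ===== VERDICT (by name: the statement is the Claim_ definition above) =====
theorem get_largeX_spec : Claim_equal_get_largeX := by
  intro array _
  unfold Spec_get_largeX get_largeX get_largeX_alt
  have hrev : PySem.List.pyRange ((PySem.List.len array) - 2) (-1) (-1)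
      = (PySem.List.pyRange 0 ((PySem.List.len array) - 1) 1).reverse := by
    rw [PySem.List.pyRange_neg_one_eq_reverse]
    norm_num
    ring_nf
  rw [altScan_eq_find?, hrev]
  rw [foldl_guard array _ (-1)
        (fun i hi => ((PySem.List.mem_pyRange_one).mp hi).1.trans_lt' (by norm_num))
        (PySem.List.pairwise_lt_pyRange_one _ _),
      foldl_last]
  cases hf : ((PySem.List.pyRange 0 ((PySem.List.len array) - 1) 1).reverse.find? (ascB array)) with
  | none => simp
  | some y =>
      have hy : y ∈ (PySem.List.pyRange 0 ((PySem.List.len array) - 1) 1).reverse :=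
        List.mem_of_find?_eq_some hf
      have h0 : (0:Int) ≤ y := ((PySem.List.mem_pyRange_one).mp (List.mem_reverse.mp hy)).1
      simp only [Option.getD_some]
      rw [if_neg (by omega)]
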